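-- pv_equiv track=rewrite | github.com/capdust/TG | text_generator.py | batching
-- ===== SOURCE A (Python) =====
-- def batching(tokens, batch_size, sequence_length):
--     ipt = []
--     labels = []
--     n_sequence = (len(tokens)-1)//sequence_length
--     for i in range(n_sequence):
--         ipt.append(tokens[i*sequence_length:(i+1)*sequence_length])
--         labels.append(tokens[i*sequence_length+1:(i+1)*sequence_length+1])
--     total = len(ipt)
--     nbatch = total//batch_size
--     input_batches = []
--     labels_batches = []
--     for i in range(nbatch):
--         input_batches.append(ipt[i*batch_size:(i+1)*batch_size])
--         labels_batches.append(labels[i*batch_size:(i+1)*batch_size])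
--     return input_batches,labels_batches
-- ===== SOURCE B (Python) =====
-- def batching(tokens, batch_size, sequence_length):
--     n_sequence = (len(tokens) - 1) // sequence_length
--     total = max(n_sequence, 0)
--     nbatch = total // batch_size
--     input_batches = []
--     labels_batches = []
--     for b in range(nbatch):
--         inp = []
--         lab = []
--         for j in range(batch_size):
--             start = (b * batch_size + j) * sequence_length
--             inp.append(tokens[start:start + sequence_length])
--             lab.append(tokens[start + 1:start + sequence_length + 1])
--         input_batches.append(inp)
--         labels_batches.append(lab)
--     return input_batches, labels_batches
-- ===== Notes on version B (the rewrite author's own statement) =====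
-- stated objective: alternative
-- what changed: B drops the intermediate ipt/labels lists entirely: it computes nbatch up front and builds each batch with one nested loop that slices tokens directly at (b*batch_size+j)*sequence_length, instead of A's two sequential passes (build all sequences, then slice the sequence lists into batches).
import Mathlib
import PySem

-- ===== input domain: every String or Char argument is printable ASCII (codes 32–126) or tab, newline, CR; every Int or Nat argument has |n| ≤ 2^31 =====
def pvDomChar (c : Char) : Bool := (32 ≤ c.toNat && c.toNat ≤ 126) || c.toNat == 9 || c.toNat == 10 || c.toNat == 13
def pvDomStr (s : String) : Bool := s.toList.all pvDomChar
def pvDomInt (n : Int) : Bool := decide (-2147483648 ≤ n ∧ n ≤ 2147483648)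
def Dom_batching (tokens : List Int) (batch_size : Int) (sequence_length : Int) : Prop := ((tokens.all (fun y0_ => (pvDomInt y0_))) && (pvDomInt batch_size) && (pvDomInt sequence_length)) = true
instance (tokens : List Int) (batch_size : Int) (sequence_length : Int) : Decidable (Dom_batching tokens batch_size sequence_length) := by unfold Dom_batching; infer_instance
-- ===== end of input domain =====

-- B replaces A's two sequential passes (build ipt/labels lists, then slice them into batches)
-- by one nested loop that slices tokens directly per (batch, position); objective: alternative decomposition.


-- ===== PORT A =====
def batching (tokens : List Int) (batch_size : Int) (sequence_length : Int) : List (List (List Int)) × List (List (List Int)) :=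
  let n_sequence := PySem.Int.floordiv ((tokens.length : Int) - 1) sequence_length
  let pl := (PySem.List.pyRange 0 n_sequence 1).foldl
      (fun s i =>
        (s.1 ++ [PySem.List.slice tokens (some (i * sequence_length)) (some ((i + 1) * sequence_length))],
         s.2 ++ [PySem.List.slice tokens (some (i * sequence_length + 1)) (some ((i + 1) * sequence_length + 1))]))
      ([], [])
  let ipt := pl.1
  let labels := pl.2
  let total : Int := (ipt.length : Int)
  let nbatch := PySem.Int.floordiv total batch_size
  (PySem.List.pyRange 0 nbatch 1).foldl
      (fun s i =>
        (s.1 ++ [PySem.List.slice ipt (some (i * batch_size)) (some ((i + 1) * batch_size))],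
         s.2 ++ [PySem.List.slice labels (some (i * batch_size)) (some ((i + 1) * batch_size))]))
      ([], [])

-- ===== PORT B =====
def batching_alt (tokens : List Int) (batch_size : Int) (sequence_length : Int) : List (List (List Int)) × List (List (List Int)) :=
  let n_sequence := PySem.Int.floordiv ((tokens.length : Int) - 1) sequence_length
  let total := max n_sequence 0
  let nbatch := PySem.Int.floordiv total batch_size
  (PySem.List.pyRange 0 nbatch 1).foldl
      (fun s b =>
        let il := (PySem.List.pyRange 0 batch_size 1).foldl
          (fun q j =>
            (q.1 ++ [PySem.List.slice tokens (some ((b * batch_size + j) * sequence_length)) (some ((b * batch_size + j) * sequence_length + sequence_length))],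
             q.2 ++ [PySem.List.slice tokens (some ((b * batch_size + j) * sequence_length + 1)) (some ((b * batch_size + j) * sequence_length + sequence_length + 1))]))
          ([], [])
        (s.1 ++ [il.1], s.2 ++ [il.2]))
      ([], [])

-- ===== PRECONDITION & SPEC =====
-- Pre_ excludes exactly the inputs where Python A raises ZeroDivisionError:
-- sequence_length = 0 or batch_size = 0 (both divisions are executed unconditionally).
def Pre_batching (_tokens : List Int) (batch_size : Int) (sequence_length : Int) : Prop :=
  batch_size ≠ 0 ∧ sequence_length ≠ 0
instance (tokens : List Int) (batch_size : Int) (sequence_length : Int) : Decidable (Pre_batching tokens batch_size sequence_length) := by unfold Pre_batching; infer_instance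

def pvWitness_batching : List Int × Int × Int := ([1, 2, 3, 4, 5, 6, 7], 2, 3)

def Spec_batching (tokens : List Int) (batch_size : Int) (sequence_length : Int) (out : List (List (List Int)) × List (List (List Int))) : Prop := out = batching_alt tokens batch_size sequence_length
instance (tokens : List Int) (batch_size : Int) (sequence_length : Int) (out : List (List (List Int)) × List (List (List Int))) : Decidable (Spec_batching tokens batch_size sequence_length out) := by unfold Spec_batching; infer_instance

-- ===== CLAIM (what is proved, stated in full; the proofs are below) =====
def Claim_equal_batching : Prop := ∀ (tokens : List Int) (batch_size : Int) (sequence_length : Int), Dom_batching tokens batch_size sequence_length → Pre_batching tokens batch_size sequence_length → Spec_batching tokens batch_size sequence_length (batching tokens batch_size sequence_length)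

-- ===== LEMMAS AND PROOFS =====

-- One batch slice of the list [g 0, g 1, …, g (n-1)] equals directly computing its bs entries.
lemma chunk_slice {α : Type} (g : Int → α) (n bs b : Int) (hbs : 0 < bs)
    (hb : 0 ≤ b) (hend : (b + 1) * bs ≤ n) :
    PySem.List.slice ((PySem.List.pyRange 0 n 1).map g) (some (b * bs)) (some ((b + 1) * bs))
      = (PySem.List.pyRange 0 bs 1).map (fun j => g (b * bs + j)) := by
  have hx : (0 : Int) ≤ b * bs := mul_nonneg hb hbs.le
  have hsum : (b + 1) * bs = b * bs + bs := by ring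
  have hy : (0 : Int) ≤ (b + 1) * bs := by omega
  rw [PySem.List.slice_toNat _ hx hy]
  apply List.ext_getElem
  · simp only [List.length_take, List.length_drop, List.length_map,
      PySem.List.length_pyRange_one]
    omega
  · intro k h1 h2
    simp only [List.getElem_take, List.getElem_drop, List.getElem_map,
      PySem.List.getElem_pyRange_one]
    congr 1
    simp only [List.length_take, List.length_drop, List.length_map,
      PySem.List.length_pyRange_one] at h1 h2
    omega

-- If the divisor is negative, a nonnegative dividend floordivides to a nonpositive quotient.
lemma floordiv_nonpos_of_neg {n bs : Int} (hn : 0 ≤ n) (hbs : bs < 0) :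
    PySem.Int.floordiv n bs ≤ 0 := by
  by_contra h
  rw [not_le] at h
  have hmod := PySem.Int.mod_neg_bounds n hbs
  have heq := PySem.Int.floordiv_mul_add_mod n bs
  nlinarith

-- The batching pass over [g 0, …, g (n-1)] equals computing each batch entry directly.
-- A pair-building foldl is the pair of the two maps.
lemma pairfold {α β γ : Type} (F : α → β) (G : α → γ) (l : List α) :
    l.foldl (fun s x => (s.1 ++ [F x], s.2 ++ [G x])) (([], []) : List β × List γ)
      = (l.map F, l.map G) := by
  rw [PySem.List.foldl_prod_mk (fun s x => s ++ [F x]) (fun s x => s ++ [G x]),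
    PySem.List.foldl_append_singleton_eq_map F, PySem.List.foldl_append_singleton_eq_map G]
  simp

-- Python //: anything floordivided by 0 is 0 in the PySem total form (A raises there; Pre_ excludes it).
lemma hdz (n : Int) : PySem.Int.floordiv n 0 = 0 := by
  simp [PySem.Int.floordiv]

lemma pyRange_zero_max (n : Int) :
    PySem.List.pyRange 0 n 1 = PySem.List.pyRange 0 (max n 0) 1 := by
  rcases le_or_gt 0 n with h | h
  · rw [max_eq_left h]
  · rw [PySem.List.pyRange_one_eq_nil h.le, PySem.List.pyRange_one_eq_nil (by omega)]

lemma batches_eq {α : Type} (g : Int → α) (n bs : Int) (hn : 0 ≤ n) :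
    (PySem.List.pyRange 0 (PySem.Int.floordiv n bs) 1).map
        (fun b => PySem.List.slice ((PySem.List.pyRange 0 n 1).map g) (some (b * bs)) (some ((b + 1) * bs)))
      = (PySem.List.pyRange 0 (PySem.Int.floordiv n bs) 1).map
        (fun b => (PySem.List.pyRange 0 bs 1).map (fun j => g (b * bs + j))) := by
  rcases lt_trichotomy bs 0 with hbs | hbs | hbs
  · rw [PySem.List.pyRange_one_eq_nil (floordiv_nonpos_of_neg hn hbs)]
    simp
  · subst hbs
    rw [hdz n, PySem.List.pyRange_one_eq_nil le_rfl]
    simp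
  · apply List.map_congr_left
    intro b hbmem
    rw [PySem.List.mem_pyRange_one] at hbmem
    have hqb : b + 1 ≤ PySem.Int.floordiv n bs := by omega
    have hle : (b + 1) * bs ≤ n := by
      have h1 : PySem.Int.floordiv n bs * bs ≤ n := by
        have hmod := PySem.Int.mod_nonneg n hbs
        have heq := PySem.Int.floordiv_mul_add_mod n bs
        omega
      nlinarith
    exact chunk_slice g n bs b hbs hbmem.1 hle

-- ===== VERDICT (by name: the statement is the Claim_ definition above) =====
theorem batching_spec : Claim_equal_batching := by
  intro tokens bs sl _ hpre
  unfold Spec_batching batching batching_alt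
  simp only [pairfold]
  simp only [List.length_map, PySem.List.length_pyRange_one, sub_zero]
  set n := PySem.Int.floordiv ((tokens.length : Int) - 1) sl with hn
  have hmax : ((n.toNat : Nat) : Int) = max n 0 := by omega
  rw [hmax, pyRange_zero_max n]
  have hmul : ∀ i : Int, (i + 1) * sl = i * sl + sl := fun i => by ring
  simp only [hmul]
  rw [batches_eq (fun i => PySem.List.slice tokens (some (i * sl)) (some (i * sl + sl))) (max n 0) bs (le_max_right _ _),
      batches_eq (fun i => PySem.List.slice tokens (some (i * sl + 1)) (some (i * sl + sl + 1))) (max n 0) bs (le_max_right _ _)]
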